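-- pv_equiv track=rewrite | github.com/Zunza5/SentenceSplitter | data_sentence.py | make_sentence_bounds_labels
-- ===== SOURCE A (Python) =====
-- def make_sentence_bounds_labels(chunk: list[list[str]]) -> tuple[str, list[int]]:
--     """
--     Given a list of sentences (where each sentence is a list of words), create:
--       - text: the concatenated string with spaces between words, keeping
--               sentences combined naturally.
--       - labels: binary list of length len(text),
--                 labels[i] = 1 if the space/boundary after char i separates two sentences
--                 labels[i] = 0 otherwise
--
--     The very last character has no semantic following boundary, so label=-1
--     """
--     text = ""
--     labels = []
--
--     for sent_idx, words in enumerate(chunk):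
--         sent_text = " ".join(words)
--         text += sent_text
--         labels.extend([0] * len(sent_text))
--
--         # After a sentence, unless it's the last one, there is a space separating
--         # it from the next sentence. This space is the sentence boundary.
--         if sent_idx < len(chunk) - 1:
--             text += " "
--             # The character before this space (the last char of the sentence)
--             # could be considered the boundary, OR the space itself.
--             # Usually, the space character itself is predicting the boundary.
--             # We'll label the SPACE character's position as 1.
--             # So the last character of sent_text was '0' above.
--             labels.append(1)
--
--     # The last character of the entire string gets -1 (ignore)
--     labels[-1] = -1
--     return text, labels
-- ===== SOURCE B (Python) =====
-- def make_sentence_bounds_labels(chunk: list[list[str]]) -> tuple[str, list[int]]: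
--     parts = [" ".join(words) for words in chunk]
--     text = " ".join(parts)
--     labels = [0] * len(text)
--     pos = 0
--     for part in parts[:-1]:
--         pos += len(part)
--         labels[pos] = 1
--         pos += 1
--     labels[-1] = -1
--     return text, labels
-- ===== Notes on version B (the rewrite author's own statement) =====
-- stated objective: alternative
-- what changed: A interleaves building the text and the label list in one pass with an index-conditional separator branch; B first joins the full text, allocates an all-zero label list of its length, then marks each inter-sentence space position in a second pass over parts[:-1] with a running char index.
-- outside the precondition, e.g. on make_sentence_bounds_labels([]): A raises IndexError, B raises IndexError; on make_sentence_bounds_labels([[]]): A raises IndexError, B raises IndexError; on make_sentence_bounds_labels([['']]): A raises IndexError, B raises IndexError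
import Mathlib
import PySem

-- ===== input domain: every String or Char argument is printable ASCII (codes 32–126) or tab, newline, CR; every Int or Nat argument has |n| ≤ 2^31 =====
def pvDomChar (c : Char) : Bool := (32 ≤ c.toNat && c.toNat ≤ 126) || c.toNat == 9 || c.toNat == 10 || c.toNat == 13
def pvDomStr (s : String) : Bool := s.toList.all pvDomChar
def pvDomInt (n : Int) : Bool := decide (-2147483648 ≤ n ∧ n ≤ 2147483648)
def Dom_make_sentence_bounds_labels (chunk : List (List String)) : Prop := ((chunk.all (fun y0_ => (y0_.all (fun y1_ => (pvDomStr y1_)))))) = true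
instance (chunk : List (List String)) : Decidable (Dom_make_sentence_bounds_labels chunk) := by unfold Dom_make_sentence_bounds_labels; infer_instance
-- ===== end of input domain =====

-- B replaces A's interleaved text/labels build with a different decomposition: join the whole
-- text first, allocate an all-zero label list, then mark each inter-sentence space position.

-- ===== PORT A =====
-- state = (text, labels); one pass over enumerate(chunk), appending the separator and its
-- label 1 for every sentence but the last; finally labels[-1] = -1.
def make_sentence_bounds_labels (chunk : List (List String)) : String × List Int :=
  let res := (PySem.List.enumerate chunk 0).foldl
    (fun (st : String × List Int) p =>
      let sent_text := PySem.Str.join " " p.2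
      let text := st.1 ++ sent_text
      let labels := st.2 ++ List.replicate sent_text.toList.length (0 : Int)
      if p.1 < (chunk.length : Int) - 1 then
        (text ++ " ", labels ++ [1])
      else
        (text, labels))
    ("", [])
  (res.1, PySem.List.pySetD res.2 (-1) (-1))

-- ===== PORT B =====
-- parts, then the full text, then a zero label list; a second pass walks parts[:-1]
-- with a running char index and sets label 1 at each separating space; finally labels[-1] = -1.
def make_sentence_bounds_labels_alt (chunk : List (List String)) : String × List Int :=
  let parts := chunk.map (fun words => PySem.Str.join " " words)
  let text := PySem.Str.join " " parts
  let labels0 := List.replicate text.toList.length (0 : Int)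
  let res := parts.dropLast.foldl
    (fun (st : List Int × Int) part =>
      let pos := st.2 + PySem.Str.len part
      (PySem.List.pySetD st.1 pos 1, pos + 1))
    (labels0, 0)
  (text, PySem.List.pySetD res.1 (-1) (-1))

-- ===== PRECONDITION & SPEC =====
-- Pre_ excludes exactly the inputs on which the Python A raises IndexError (labels[-1] on an
-- empty label list, i.e. the built text is empty): [], [[]] and [[""]].  B raises there too.
def Pre_make_sentence_bounds_labels (chunk : List (List String)) : Prop :=
  chunk ≠ [] ∧ chunk ≠ [[]] ∧ chunk ≠ [[""]]
instance (chunk : List (List String)) : Decidable (Pre_make_sentence_bounds_labels chunk) := by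
  unfold Pre_make_sentence_bounds_labels; infer_instance
def pvWitness_make_sentence_bounds_labels : List (List String) := [["ab", "c"], ["d"]]

def Spec_make_sentence_bounds_labels (chunk : List (List String)) (out : String × List Int) : Prop := out = make_sentence_bounds_labels_alt chunk
instance (chunk : List (List String)) (out : String × List Int) : Decidable (Spec_make_sentence_bounds_labels chunk out) := by unfold Spec_make_sentence_bounds_labels; infer_instance

-- ===== CLAIM (what is proved, stated in full; the proofs are below) =====
def Claim_equal_make_sentence_bounds_labels : Prop := ∀ (chunk : List (List String)), Dom_make_sentence_bounds_labels chunk → Pre_make_sentence_bounds_labels chunk → Spec_make_sentence_bounds_labels chunk (make_sentence_bounds_labels chunk)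

-- ===== LEMMAS AND PROOFS =====

-- intercalate of a nonempty tail, cons form
lemma pv_intercalate_cons {α : Type} (sep x : List α) (xs : List (List α)) (h : xs ≠ []) :
    List.intercalate sep (x :: xs) = x ++ sep ++ List.intercalate sep xs := by
  rcases xs with _ | ⟨y, ys⟩
  · exact absurd rfl h
  · simp [List.intercalate]

-- intercalate with the last element split off
lemma pv_intercalate_last {α : Type} (sep : List α) :
    ∀ (ps : List (List α)) (f : List α),
      List.intercalate sep (ps ++ [f]) = ps.flatMap (fun p => p ++ sep) ++ f := by
  intro ps
  induction ps with
  | nil => intro f; simp [List.intercalate]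
  | cons p ps ih =>
    intro f
    rw [List.cons_append, pv_intercalate_cons sep p (ps ++ [f]) (by simp), ih f]
    simp

-- a zero list of the length of an intercalation is the intercalation of zero lists
lemma pv_replicate_intercalate :
    ∀ (ls : List (List Char)),
      List.replicate (List.intercalate [' '] ls).length (0 : Int)
        = List.intercalate [(0 : Int)] (ls.map (fun l => List.replicate l.length 0)) := by
  intro ls
  induction ls with
  | nil => simp [List.intercalate]
  | cons l ls ih =>
    rcases ls with _ | ⟨m, ms⟩
    · simp [List.intercalate]
    · rw [pv_intercalate_cons [' '] l (m :: ms) (by simp), List.map_cons,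
        pv_intercalate_cons [(0 : Int)] _ _ (by simp)]
      have hlen : (l ++ [' '] ++ List.intercalate [' '] (m :: ms)).length
          = (l.length + 1) + (List.intercalate [' '] (m :: ms)).length := by simp; omega
      rw [hlen, List.replicate_add, List.replicate_succ', ih]

-- A's loop over the non-final sentences (all indices below n - 1 take the separator branch)
lemma pv_loopA (n : Int) :
    ∀ (ys : List (List String)) (s : Int) (t : String) (lb : List Int),
      s + ys.length ≤ n - 1 →
      ((PySem.List.enumerate ys s).foldl
        (fun (st : String × List Int) p =>
          let sent_text := PySem.Str.join " " p.2
          let text := st.1 ++ sent_text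
          let labels := st.2 ++ List.replicate sent_text.toList.length (0 : Int)
          if p.1 < n - 1 then (text ++ " ", labels ++ [1]) else (text, labels))
        (t, lb)).1.toList
        = t.toList ++ ys.flatMap (fun w => (PySem.Str.join " " w).toList ++ [' ']) ∧
      ((PySem.List.enumerate ys s).foldl
        (fun (st : String × List Int) p =>
          let sent_text := PySem.Str.join " " p.2
          let text := st.1 ++ sent_text
          let labels := st.2 ++ List.replicate sent_text.toList.length (0 : Int)
          if p.1 < n - 1 then (text ++ " ", labels ++ [1]) else (text, labels))
        (t, lb)).2
        = lb ++ ys.flatMap (fun w => List.replicate (PySem.Str.join " " w).toList.length (0 : Int) ++ [1]) := by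
  intro ys
  induction ys with
  | nil => intro s t lb _; simp [PySem.List.enumerate]
  | cons y ys ih =>
    intro s t lb h
    have hlen : (s : Int) + (ys.length : Int) + 1 ≤ n - 1 := by
      simp only [List.length_cons] at h; push_cast at h ⊢; omega
    have hs : s < n - 1 := by
      have : (0 : Int) ≤ ys.length := by positivity
      omega
    simp only [PySem.List.enumerate, List.foldl_cons, if_pos hs]
    obtain ⟨h1, h2⟩ := ih (s + 1) (t ++ PySem.Str.join " " y ++ " ")
      (lb ++ List.replicate (PySem.Str.join " " y).toList.length (0 : Int) ++ [1])
      (by omega)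
    refine ⟨?_, ?_⟩
    · rw [h1]; simp
    · rw [h2]; simp

-- B's loop: setting label 1 at every separator position turns the 0-separators into 1-separators
lemma pv_loopB :
    ∀ (qs : List String) (f : String) (pre : List Int),
      ((qs.foldl
        (fun (st : List Int × Int) part =>
          let pos := st.2 + PySem.Str.len part
          (PySem.List.pySetD st.1 pos 1, pos + 1))
        (pre ++ List.intercalate [(0 : Int)] ((qs ++ [f]).map (fun p => List.replicate p.toList.length 0)),
          (pre.length : Int)))).1
        = pre ++ List.intercalate [(1 : Int)] ((qs ++ [f]).map (fun p => List.replicate p.toList.length 0)) := by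
  intro qs
  induction qs with
  | nil => intro f pre; simp [List.intercalate]
  | cons q qs ih =>
    intro f pre
    have hcons0 :
        List.intercalate [(0 : Int)] (((q :: qs) ++ [f]).map (fun p => List.replicate p.toList.length 0))
          = List.replicate q.toList.length 0 ++ [(0 : Int)]
            ++ List.intercalate [(0 : Int)] ((qs ++ [f]).map (fun p => List.replicate p.toList.length 0)) := by
      rw [List.cons_append, List.map_cons, pv_intercalate_cons _ _ _ (by simp)]
    have hcons1 :
        List.intercalate [(1 : Int)] (((q :: qs) ++ [f]).map (fun p => List.replicate p.toList.length 0))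
          = List.replicate q.toList.length 0 ++ [(1 : Int)]
            ++ List.intercalate [(1 : Int)] ((qs ++ [f]).map (fun p => List.replicate p.toList.length 0)) := by
      rw [List.cons_append, List.map_cons, pv_intercalate_cons _ _ _ (by simp)]
    have hpos : (pre.length : Int) + PySem.Str.len q = ((pre.length + q.toList.length : Nat) : Int) := by
      rw [PySem.Str.len_eq]; push_cast; ring
    have hset :
        PySem.List.pySetD
          (pre ++ List.intercalate [(0 : Int)] (((q :: qs) ++ [f]).map (fun p => List.replicate p.toList.length 0)))
          ((pre.length : Int) + PySem.Str.len q) 1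
          = (pre ++ List.replicate q.toList.length 0 ++ [(1 : Int)])
            ++ List.intercalate [(0 : Int)] ((qs ++ [f]).map (fun p => List.replicate p.toList.length 0)) := by
      rw [hcons0, hpos, PySem.List.pySetD_natCast]
      rw [show pre ++ (List.replicate q.toList.length (0 : Int) ++ [(0 : Int)]
            ++ List.intercalate [(0 : Int)] ((qs ++ [f]).map (fun p => List.replicate p.toList.length 0)))
          = (pre ++ List.replicate q.toList.length (0 : Int))
            ++ ((0 : Int) :: List.intercalate [(0 : Int)] ((qs ++ [f]).map (fun p => List.replicate p.toList.length 0)))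
          from by simp]
      rw [show pre.length + q.toList.length = (pre ++ List.replicate q.toList.length (0 : Int)).length + 0 from by simp]
      rw [List.set_append_right _ _ (by omega)]
      simp
    simp only [List.foldl_cons]
    rw [hset, hcons1]
    have hlen2 : (pre.length : Int) + PySem.Str.len q + 1
        = (((pre ++ List.replicate q.toList.length (0 : Int) ++ [(1 : Int)]).length : Nat) : Int) := by
      rw [PySem.Str.len_eq]; simp; ring
    rw [hlen2]
    have := ih f (pre ++ List.replicate q.toList.length (0 : Int) ++ [(1 : Int)])
    simpa using this

-- " ".join at the char-list level is an intercalation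
lemma pv_join_toList (ps : List String) :
    (PySem.Str.join " " ps).toList = List.intercalate [' '] (ps.map String.toList) := by
  have hsp : (" " : String).toList = [' '] := by decide
  rw [PySem.Str.toList_join, hsp]; rfl

-- characterization of A on a nonempty chunk
lemma pv_A_concat (ys : List (List String)) (y : List String) :
    (make_sentence_bounds_labels (ys ++ [y])).1.toList
      = List.intercalate [' '] (((ys ++ [y]).map (PySem.Str.join " ")).map String.toList) ∧
    (make_sentence_bounds_labels (ys ++ [y])).2
      = PySem.List.pySetD
          (List.intercalate [(1 : Int)]
            (((ys ++ [y]).map (PySem.Str.join " ")).map (fun p => List.replicate p.toList.length 0)))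
          (-1) (-1) := by
  have hbound : (0 : Int) + (ys.length : Int) ≤ (((ys ++ [y]).length : Nat) : Int) - 1 := by
    simp only [List.length_append, List.length_cons, List.length_nil]; push_cast; omega
  have hA := pv_loopA (((ys ++ [y]).length : Nat) : Int) ys 0 "" [] hbound
  have henum : PySem.List.enumerate (ys ++ [y]) 0
      = PySem.List.enumerate ys 0 ++ [((ys.length : Int), y)] := by
    rw [PySem.List.enumerate_append]; simp [PySem.List.enumerate]
  have hcond : ¬ ((ys.length : Int) < (((ys ++ [y]).length : Nat) : Int) - 1) := by
    simp only [List.length_append, List.length_cons, List.length_nil]; push_cast; omega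
  constructor
  · simp only [make_sentence_bounds_labels, henum, List.foldl_append, List.foldl_cons,
      List.foldl_nil, if_neg hcond]
    rw [String.toList_append, hA.1]
    simp only [List.map_append, List.map_map, List.map_cons, List.map_nil]
    rw [pv_intercalate_last [' '] (ys.map (String.toList ∘ PySem.Str.join " "))]
    rw [show ("" : String).toList = [] from rfl, List.nil_append, List.flatMap_map]
    rfl
  · simp only [make_sentence_bounds_labels, henum, List.foldl_append, List.foldl_cons,
      List.foldl_nil, if_neg hcond]
    rw [hA.2]
    simp only [List.map_append, List.map_map, List.map_cons, List.map_nil]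
    rw [pv_intercalate_last [(1 : Int)] (ys.map ((fun p => List.replicate p.toList.length (0 : Int)) ∘ PySem.Str.join " "))]
    rw [List.nil_append, List.flatMap_map]
    rfl

-- characterization of B on a nonempty chunk
lemma pv_B_concat (ys : List (List String)) (y : List String) :
    make_sentence_bounds_labels_alt (ys ++ [y])
      = (PySem.Str.join " " ((ys ++ [y]).map (PySem.Str.join " ")),
         PySem.List.pySetD
           (List.intercalate [(1 : Int)]
             (((ys ++ [y]).map (PySem.Str.join " ")).map (fun p => List.replicate p.toList.length 0)))
           (-1) (-1)) := by
  have hsp : (" " : String).toList = [' '] := by decide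
  have htext : (PySem.Str.join " " ((ys ++ [y]).map (PySem.Str.join " "))).toList
      = List.intercalate [' '] (((ys ++ [y]).map (PySem.Str.join " ")).map String.toList) := by
    rw [PySem.Str.toList_join, hsp]; rfl
  have hlab0 : List.replicate (PySem.Str.join " " ((ys ++ [y]).map (PySem.Str.join " "))).toList.length (0 : Int)
      = List.intercalate [(0 : Int)]
          (((ys ++ [y]).map (PySem.Str.join " ")).map (fun p => List.replicate p.toList.length 0)) := by
    rw [htext, pv_replicate_intercalate, List.map_map]
    rfl
  have hdrop : ((ys ++ [y]).map (PySem.Str.join " ")).dropLast = ys.map (PySem.Str.join " ") := by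
    rw [List.map_append]; simp
  have hmap : (ys ++ [y]).map (PySem.Str.join " ")
      = ys.map (PySem.Str.join " ") ++ [PySem.Str.join " " y] := by
    simp
  simp only [make_sentence_bounds_labels_alt, hdrop]
  refine Prod.ext rfl ?_
  simp only []
  rw [hlab0]
  congr 1
  have hB := pv_loopB (ys.map (PySem.Str.join " ")) (PySem.Str.join " " y) []
  simp only [List.nil_append, List.length_nil, Nat.cast_zero] at hB
  rw [hmap, hB]

-- ===== VERDICT (by name: the statement is the Claim_ definition above) =====
theorem make_sentence_bounds_labels_spec : Claim_equal_make_sentence_bounds_labels := by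
  intro chunk _ hpre
  unfold Spec_make_sentence_bounds_labels
  rcases List.eq_nil_or_concat chunk with rfl | ⟨ys, y, rfl⟩
  · exact absurd rfl hpre.1
  · simp only [List.concat_eq_append]
    have hA := pv_A_concat ys y
    have hB := pv_B_concat ys y
    refine Prod.ext ?_ ?_
    · apply String.toList_inj.mp
      rw [hA.1, hB, pv_join_toList]
    · rw [hA.2, hB]
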